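-- pv_equiv track=rewrite | github.com/schmacka/printernizer | src/services/discovery_service.py | _extract_ssdp_field
-- ===== SOURCE A (Python) =====
-- from typing import List, Dict, Any, Optional
--
-- def _extract_ssdp_field(message: str, field: str) -> Optional[str]:
--     """Extract a field from SSDP message."""
--     try:
--         for line in message.split('\n'):
--             if line.startswith(f'{field}:'):
--                 return line.split(':', 1)[1].strip()
--     except Exception:
--         pass
--     return None
-- ===== SOURCE B (Python) =====
-- from typing import Optional
--
-- def _extract_ssdp_field(message: str, field: str) -> Optional[str]:
--     """Extract a field from SSDP message (index-then-lookup)."""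
--     table = {}
--     for line in message.split('\n'):
--         parts = line.split(':', 1)
--         if len(parts) == 2:
--             table.setdefault(parts[0], parts[1].strip())
--     return table.get(field)
-- ===== Notes on version B (the rewrite author's own statement) =====
-- stated objective: alternative
-- what changed: B replaces A's early-returning prefix scan with an index-then-lookup structure: one pass builds a dict mapping each line's part before its first ':' to the stripped remainder (setdefault keeps the first occurrence), and the result is dict.get(field). Pre_ excludes only the inputs where field itself contains ':' (never a real SSDP header name) and some line starts with field+':' (checked as the substring '\n'+field+':' in '\n'+message): there A's startswith matches across colons while the first-colon-keyed lookup finds nothing, and both behaviours are defensible.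
-- outside the precondition, e.g. on _extract_ssdp_field('a:b:c\n', 'a:b'): A returns 'b:c', B returns None
import Mathlib
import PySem

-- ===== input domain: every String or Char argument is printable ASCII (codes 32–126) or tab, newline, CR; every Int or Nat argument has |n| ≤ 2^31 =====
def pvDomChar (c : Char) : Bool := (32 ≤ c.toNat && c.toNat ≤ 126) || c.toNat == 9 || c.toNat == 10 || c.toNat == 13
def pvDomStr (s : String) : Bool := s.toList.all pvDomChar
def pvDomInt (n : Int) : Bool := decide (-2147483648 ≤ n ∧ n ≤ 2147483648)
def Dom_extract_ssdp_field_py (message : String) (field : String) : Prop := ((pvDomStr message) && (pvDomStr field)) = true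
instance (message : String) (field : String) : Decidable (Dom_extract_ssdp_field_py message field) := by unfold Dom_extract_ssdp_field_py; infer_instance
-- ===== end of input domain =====

-- B replaces A's early-returning prefix scan by an index-then-lookup structure (build a
-- key→first-value dict from each line's part before its first ':', then dict.get(field));
-- objective: alternative (same cost, different structure).


-- ===== PORT A =====
-- the 'for line in …: if line.startswith(f'{field}:'): return line.split(':',1)[1].strip()' loop;
-- the none branches are Python's try/except → 'return None' paths (never reached: ':' is a nonempty
-- separator and the startswith guard guarantees parts[1] exists)
def pvALoopA (field : String) : List String → Option String
  | [] => none
  | l :: ls =>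
    if PySem.Str.startswith l (field ++ ":") then
      match PySem.Str.splitMax? l ":" 1 with
      | none => none
      | some parts =>
        match PySem.List.pyGet? parts 1 with
        | none => none
        | some v => some (PySem.Str.strip v)
    else pvALoopA field ls

def extract_ssdp_field_py (message : String) (field : String) : Option String :=
  match PySem.Str.split? message "\n" with
  | none => none          -- unreachable: '\n' is a nonempty separator
  | some lines => pvALoopA field lines

-- ===== PORT B =====
-- Source B's loop: table = {}; for line in lines: parts = line.split(':', 1);
--              if len(parts) == 2: table.setdefault(parts[0], parts[1].strip())
def pvBuildB (d : PySem.Dict String String) : List String → PySem.Dict String String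
  | [] => d
  | l :: ls =>
    match PySem.Str.splitMax? l ":" 1 with
    | some [k, v] => pvBuildB (d.setdefault k (PySem.Str.strip v)) ls
    | _ => pvBuildB d ls

def extract_ssdp_field_py_alt (message : String) (field : String) : Option String :=
  match PySem.Str.split? message "\n" with
  | none => none          -- unreachable: '\n' is a nonempty separator
  | some lines => (pvBuildB PySem.Dict.empty lines).get? field

-- ===== PRECONDITION & SPEC =====
-- Pre_ excludes the inputs where field itself contains ':' (never a real SSDP header
-- name) AND some line of the message starts with field + ':' (checked as the substring
-- '\n' + field + ':' occurring in '\n' + message): there A's startswith(f'{field}:')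
-- accidentally matches across multiple colons while B's first-colon-keyed lookup finds
-- nothing; both behaviours are defensible on such field names.
def Pre_extract_ssdp_field_py (message : String) (field : String) : Prop :=
  ':' ∉ field.toList ∨ PySem.Str.isIn ("\n" ++ field ++ ":") ("\n" ++ message) = false

instance (message : String) (field : String) : Decidable (Pre_extract_ssdp_field_py message field) := by
  unfold Pre_extract_ssdp_field_py; infer_instance

def pvWitness_extract_ssdp_field_py : String × String := ("HOST: 239.255.255.250\r\nNT: upnp:rootdevice", "NT")

def Spec_extract_ssdp_field_py (message : String) (field : String) (out : Option String) : Prop := out = extract_ssdp_field_py_alt message field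
instance (message : String) (field : String) (out : Option String) : Decidable (Spec_extract_ssdp_field_py message field out) := by unfold Spec_extract_ssdp_field_py; infer_instance

-- ===== CLAIM (what is proved, stated in full; the proofs are below) =====
def Claim_equal_extract_ssdp_field_py : Prop := ∀ (message : String) (field : String), Dom_extract_ssdp_field_py message field → Pre_extract_ssdp_field_py message field → Spec_extract_ssdp_field_py message field (extract_ssdp_field_py message field)

-- ===== LEMMAS AND PROOFS =====

-- with maxsplit exhausted, splitOnMax.go emits the rest as the final piece
theorem pv_go_zero (fuel : ℕ) (l cur : List Char) (acc : List (List Char)) :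
    PySem.Chars.splitOnMax.go [':'] fuel 0 l cur acc = ((cur.reverse ++ l) :: acc).reverse := by
  cases fuel with
  | zero => simp [PySem.Chars.splitOnMax.go]
  | succ f => cases l <;> simp [PySem.Chars.splitOnMax.go]

-- with maxsplit 1, splitOnMax.go cuts exactly at the first ':' (if any)
theorem pv_go_one (fuel : ℕ) (l cur : List Char) (acc : List (List Char)) (h : l.length < fuel) :
    PySem.Chars.splitOnMax.go [':'] fuel 1 l cur acc =
      if ':' ∈ l then
        acc.reverse ++ [cur.reverse ++ l.takeWhile (· ≠ ':'), (l.dropWhile (· ≠ ':')).tail]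
      else acc.reverse ++ [cur.reverse ++ l] := by
  induction fuel generalizing l cur acc with
  | zero => omega
  | succ f ih =>
    cases l with
    | nil => simp [PySem.Chars.splitOnMax.go]
    | cons a rest =>
      by_cases ha : a = ':'
      · subst ha
        simp only [PySem.Chars.splitOnMax.go, List.isPrefixOf, beq_self_eq_true, Bool.true_and,
          if_true, if_neg (by omega : ¬ (1 : ℕ) = 0)]
        rw [pv_go_zero]
        simp [List.takeWhile, List.dropWhile]
      · have hpre : [':'].isPrefixOf (a :: rest) = false := by
          simp [List.isPrefixOf]; exact fun hc => absurd hc.symm ha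
        simp only [PySem.Chars.splitOnMax.go, hpre, if_neg (by omega : ¬ (1 : ℕ) = 0),
          Bool.false_eq_true, if_false]
        rw [ih rest (a :: cur) acc (by simpa using Nat.lt_of_succ_lt_succ h)]
        simp only [List.takeWhile, List.dropWhile, List.mem_cons,
          show (':' = a) = False by simp [Ne.symm ha], false_or]
        simp [ha]

-- line.split(':', 1) characterised
theorem pv_splitMax_colon (l : String) :
    PySem.Str.splitMax? l ":" 1 =
      some (if ':' ∈ l.toList then
              [String.ofList (l.toList.takeWhile (· ≠ ':')),
               String.ofList ((l.toList.dropWhile (· ≠ ':')).tail)]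
            else [l]) := by
  show Option.map _ (PySem.Chars.splitMax? l.toList ":".toList 1) = _
  have hsep : (":".toList) = [':'] := rfl
  rw [hsep]
  unfold PySem.Chars.splitMax? PySem.Chars.splitOnMax
  rw [if_neg (by simp), if_neg (by omega)]
  rw [show ((1 : ℤ).toNat) = 1 from rfl,
    pv_go_one (l.toList.length + 1) _ _ _ (Nat.lt_succ_self _)]
  by_cases h : ':' ∈ l.toList <;> simp [h, String.ofList_toList]

-- startswith(field + ':') ↔ field is exactly the part before the first ':' (given ':' ∉ field)
theorem pv_prefix_iff (f l : List Char) (hf : ':' ∉ f) :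
    (f ++ [':']) <+: l ↔ (l.takeWhile (· ≠ ':') = f ∧ ':' ∈ l) := by
  induction f generalizing l with
  | nil =>
    cases l with
    | nil => simp
    | cons a t =>
      constructor
      · rintro ⟨u, hu⟩
        cases hu
        simp [List.takeWhile]
      · rintro ⟨htw, _⟩
        have ha : a = ':' := by
          by_contra hne
          simp [List.takeWhile, hne] at htw
        subst ha
        exact ⟨t, rfl⟩
  | cons b f' ih =>
    have hb : b ≠ ':' := fun h => hf (h ▸ List.mem_cons_self)
    have hf' : ':' ∉ f' := fun h => hf (List.mem_cons_of_mem _ h)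
    cases l with
    | nil => simp
    | cons a t =>
      constructor
      · rintro ⟨u, hu⟩
        injection hu with h1 h2
        subst h1
        have h3 := (ih t hf').mp ⟨u, by simpa using h2⟩
        refine ⟨?_, List.mem_cons_of_mem _ h3.2⟩
        simp only [List.takeWhile, decide_not]
        rw [show (decide (b = ':')) = false by simp [hb]]
        simpa using h3.1
      · rintro ⟨htw, hm⟩
        by_cases ha : a = ':'
        · rw [ha] at htw; simp [List.takeWhile] at htw
        · have h12 : a = b ∧ List.takeWhile (fun x => !decide (x = ':')) t = f' := by
            simpa [List.takeWhile, ha] using htw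
          obtain ⟨h1, h2⟩ := h12
          subst h1
          have hmt : ':' ∈ t := by
            rcases List.mem_cons.mp hm with h | h
            · exact absurd h.symm ha
            · exact h
          obtain ⟨u, hu⟩ := (ih t hf').mpr ⟨by simpa using h2, hmt⟩
          exact ⟨u, by simp [← hu]⟩

-- the main invariant: looking up field in the dict built so far is "what is already
-- stored, else what A's scan would find in the remaining lines"
theorem pv_loop (field : String) (hf : ':' ∉ field.toList) :
    ∀ (lines : List String) (d : PySem.Dict String String),
      (pvBuildB d lines).get? field = (d.get? field).or (pvALoopA field lines) := by
  intro lines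
  induction lines with
  | nil => intro d; simp [pvBuildB, pvALoopA, Option.or_none]
  | cons l ls ih =>
    intro d
    have hsw : PySem.Str.startswith l (field ++ ":") =
        PySem.Chars.startswith l.toList (field.toList ++ [':']) := by
      rw [PySem.Str.startswith_eq]; simp
    by_cases hmem : ':' ∈ l.toList
    · -- the line has a colon: parts = [key, rest]
      by_cases hk : l.toList.takeWhile (· ≠ ':') = field.toList
      · -- key = field: A matches this line, B setdefaults under key field
        have hpre : (field.toList ++ [':']) <+: l.toList := (pv_prefix_iff _ _ hf).mpr ⟨hk, hmem⟩
        have hsw' : PySem.Str.startswith l (field ++ ":") = true := by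
          rw [hsw]; exact (PySem.Chars.startswith_iff _ _).mpr hpre
        have hkeq : String.ofList (l.toList.takeWhile (· ≠ ':')) = field := by
          rw [hk, String.ofList_toList]
        simp only [pvBuildB, pvALoopA, pv_splitMax_colon, if_pos hmem, hkeq, hsw', if_true]
        rw [ih]
        rw [PySem.Dict.get?_setdefault_self]
        simp only [PySem.List.pyGet?, PySem.List.pyIdx?]
        cases d.get? field <;> simp [Option.or]
      · -- key ≠ field: A skips the line, B stores under a different key
        have hne : field ≠ String.ofList (l.toList.takeWhile (· ≠ ':')) := by
          intro h
          have h2 := congrArg String.toList h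
          rw [String.toList_ofList] at h2
          exact hk h2.symm
        have hsw' : PySem.Str.startswith l (field ++ ":") = false := by
          rw [hsw]
          by_contra hc
          have : PySem.Chars.startswith l.toList (field.toList ++ [':']) = true := by
            revert hc; cases PySem.Chars.startswith l.toList (field.toList ++ [':']) <;> simp
          exact hk ((pv_prefix_iff _ _ hf).mp ((PySem.Chars.startswith_iff _ _).mp this)).1
        simp only [pvBuildB, pvALoopA, pv_splitMax_colon, if_pos hmem, hsw', Bool.false_eq_true,
          if_false]
        rw [ih, PySem.Dict.get?_setdefault_of_ne _ _ hne]
    · -- no colon in the line: A cannot match, B skips (parts = [l])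
      have hsw' : PySem.Str.startswith l (field ++ ":") = false := by
        rw [hsw]
        by_contra hc
        have : PySem.Chars.startswith l.toList (field.toList ++ [':']) = true := by
          revert hc; cases PySem.Chars.startswith l.toList (field.toList ++ [':']) <;> simp
        have hpre := (PySem.Chars.startswith_iff _ _).mp this
        exact hmem (hpre.mem (by simp))
      simp only [pvBuildB, pvALoopA, pv_splitMax_colon, if_neg hmem, hsw', Bool.false_eq_true,
        if_false]
      exact ih d

-- pvSplit is splitOn-by-'\n' written as a structural recursion (proof helper only)
def pvSplit (l : List Char) : List (List Char) :=
  match l with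
  | [] => [[]]
  | c :: rest => if c = '\n' then [] :: pvSplit rest else (pvSplit rest).modifyHead (c :: ·)

theorem pvSplit_ne_nil (l : List Char) : pvSplit l ≠ [] := by
  induction l with
  | nil => simp [pvSplit]
  | cons c rest ih =>
    simp only [pvSplit]
    split_ifs
    · simp
    · cases h : pvSplit rest with
      | nil => exact absurd h ih
      | cons h0 t0 => simp

theorem pv_goSplit (fuel : ℕ) (l cur : List Char) (acc : List (List Char))
    (h : l.length < fuel) :
    PySem.Chars.splitOn.go ['\n'] fuel l cur acc =
      acc.reverse ++ (pvSplit l).modifyHead (cur.reverse ++ ·) := by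
  induction fuel generalizing l cur acc with
  | zero => omega
  | succ f ih =>
    cases l with
    | nil => simp [PySem.Chars.splitOn.go, pvSplit]
    | cons c rest =>
      by_cases hc : c = '\n'
      · subst hc
        simp only [PySem.Chars.splitOn.go, List.isPrefixOf, beq_self_eq_true, Bool.true_and,
          if_true]
        rw [show (List.drop ['\n'].length ('\n' :: rest)) = rest from rfl]
        rw [ih rest [] (cur.reverse :: acc) (by simpa using Nat.lt_of_succ_lt_succ h)]
        obtain ⟨h0, t0, h0t0⟩ : ∃ h0 t0, pvSplit rest = h0 :: t0 := by
          cases hps : pvSplit rest with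
          | nil => exact absurd hps (pvSplit_ne_nil rest)
          | cons a b => exact ⟨a, b, rfl⟩
        simp [pvSplit, h0t0]
      · have hpre : ['\n'].isPrefixOf (c :: rest) = false := by
          simp [List.isPrefixOf]; exact fun hcc => absurd hcc.symm hc
        simp only [PySem.Chars.splitOn.go, hpre, Bool.false_eq_true, if_false]
        rw [ih rest (c :: cur) acc (by simpa using Nat.lt_of_succ_lt_succ h)]
        obtain ⟨h0, t0, h0t0⟩ : ∃ h0 t0, pvSplit rest = h0 :: t0 := by
          cases hps : pvSplit rest with
          | nil => exact absurd hps (pvSplit_ne_nil rest)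
          | cons a b => exact ⟨a, b, rfl⟩
        simp [pvSplit, h0t0, hc]

theorem pv_splitOn_char (s : List Char) : PySem.Chars.splitOn s ['\n'] = pvSplit s := by
  unfold PySem.Chars.splitOn
  rw [pv_goSplit (s.length + 1) s [] [] (Nat.lt_succ_self _)]
  obtain ⟨h0, t0, h0t0⟩ : ∃ h0 t0, pvSplit s = h0 :: t0 := by
    cases hps : pvSplit s with
    | nil => exact absurd hps (pvSplit_ne_nil s)
    | cons a b => exact ⟨a, b, rfl⟩
  simp [h0t0]

theorem pvSplit_head_prefix (l : List Char) :
    ∀ h0 t0, pvSplit l = h0 :: t0 → h0 <+: l := by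
  induction l with
  | nil => intro h0 t0 h; simp [pvSplit] at h; simp [h.1]
  | cons c rest ih =>
    intro h0 t0 h
    by_cases hc : c = '\n'
    · subst hc
      simp only [pvSplit, if_true] at h
      injection h with h1 _
      simp [← h1]
    · obtain ⟨h1, t1, h1t1⟩ : ∃ h1 t1, pvSplit rest = h1 :: t1 := by
        cases hps : pvSplit rest with
        | nil => exact absurd hps (pvSplit_ne_nil rest)
        | cons a b => exact ⟨a, b, rfl⟩
      simp only [pvSplit, hc, if_false, h1t1, List.modifyHead] at h
      injection h with h2 _
      rw [← h2]
      exact (List.cons_prefix_cons).mpr ⟨rfl, ih h1 t1 h1t1⟩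

theorem pvSplit_tail_infix (l : List Char) :
    ∀ line ∈ (pvSplit l).tail, ('\n' :: line) <:+: l := by
  induction l with
  | nil => simp [pvSplit]
  | cons c rest ih =>
    intro line hline
    by_cases hc : c = '\n'
    · subst hc
      simp only [pvSplit, if_true, List.tail_cons] at hline
      obtain ⟨h1, t1, h1t1⟩ : ∃ h1 t1, pvSplit rest = h1 :: t1 := by
        cases hps : pvSplit rest with
        | nil => exact absurd hps (pvSplit_ne_nil rest)
        | cons a b => exact ⟨a, b, rfl⟩
      rw [h1t1] at hline
      rcases List.mem_cons.mp hline with h | h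
      · subst h
        exact ((List.cons_prefix_cons).mpr ⟨rfl, pvSplit_head_prefix rest line t1 h1t1⟩).isInfix
      · exact ((ih line (by simp [h1t1, h])).trans (rest.suffix_cons '\n').isInfix)
    · obtain ⟨h1, t1, h1t1⟩ : ∃ h1 t1, pvSplit rest = h1 :: t1 := by
        cases hps : pvSplit rest with
        | nil => exact absurd hps (pvSplit_ne_nil rest)
        | cons a b => exact ⟨a, b, rfl⟩
      simp only [pvSplit, hc, if_false, h1t1, List.modifyHead, List.tail_cons] at hline
      exact List.infix_cons (ih line (by simp [h1t1, hline]))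

theorem pvSplit_infix (l : List Char) :
    ∀ line ∈ pvSplit l, ('\n' :: line) <:+: ('\n' :: l) := by
  intro line hline
  obtain ⟨h0, t0, h0t0⟩ : ∃ h0 t0, pvSplit l = h0 :: t0 := by
    cases hps : pvSplit l with
    | nil => exact absurd hps (pvSplit_ne_nil l)
    | cons a b => exact ⟨a, b, rfl⟩
  rw [h0t0] at hline
  rcases List.mem_cons.mp hline with h | h
  · subst h
    exact ((List.cons_prefix_cons).mpr ⟨rfl, pvSplit_head_prefix l line t0 h0t0⟩).isInfix
  · exact List.infix_cons (pvSplit_tail_infix l line (by simp [h0t0, h]))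

-- if no line can match, A's scan returns None
theorem pvALoop_none (field : String) (lines : List String)
    (h : ∀ l ∈ lines, PySem.Str.startswith l (field ++ ":") = false) :
    pvALoopA field lines = none := by
  induction lines with
  | nil => rfl
  | cons l ls ih =>
    simp only [pvALoopA, h l List.mem_cons_self, Bool.false_eq_true, if_false]
    exact ih fun x hx => h x (List.mem_cons_of_mem _ hx)

-- a field containing ':' never equals a stored key (keys are colon-free)
theorem pvBuild_none (field : String) (hc : ':' ∈ field.toList) :
    ∀ (lines : List String) (d : PySem.Dict String String),
      (pvBuildB d lines).get? field = d.get? field := by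
  intro lines
  induction lines with
  | nil => intro d; rfl
  | cons l ls ih =>
    intro d
    by_cases hmem : ':' ∈ l.toList
    · have hne : field ≠ String.ofList (l.toList.takeWhile (· ≠ ':')) := by
        intro h
        have h2 := congrArg String.toList h
        rw [String.toList_ofList] at h2
        have := List.mem_takeWhile_imp (h2 ▸ hc)
        simp at this
      simp only [pvBuildB, pv_splitMax_colon, if_pos hmem]
      rw [ih, PySem.Dict.get?_setdefault_of_ne _ _ hne]
    · simp only [pvBuildB, pv_splitMax_colon, if_neg hmem]
      exact ih d

-- ===== VERDICT (by name: the statement is the Claim_ definition above) =====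
theorem extract_ssdp_field_py_spec : Claim_equal_extract_ssdp_field_py := by
  intro message field _ hpre
  unfold Spec_extract_ssdp_field_py extract_ssdp_field_py extract_ssdp_field_py_alt
  have hsplit : PySem.Str.split? message "\n" =
      some (List.map String.ofList (pvSplit message.toList)) := by
    show Option.map _ (PySem.Chars.split? message.toList "\n".toList) = _
    unfold PySem.Chars.split?
    rw [if_neg (by simp), show ("\n".toList) = ['\n'] from rfl, pv_splitOn_char]
    rfl
  rw [hsplit]
  show pvALoopA field (List.map String.ofList (pvSplit message.toList)) =
    (pvBuildB PySem.Dict.empty (List.map String.ofList (pvSplit message.toList))).get? field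
  by_cases hc : ':' ∈ field.toList
  · -- field contains ':' : Pre_ says no line starts with field + ':', so both sides are none
    have hnin : PySem.Str.isIn ("\n" ++ field ++ ":") ("\n" ++ message) = false :=
      hpre.resolve_left (not_not_intro hc)
    have hnin' : ¬ ('\n' :: (field.toList ++ [':'])) <:+: ('\n' :: message.toList) := by
      rw [PySem.Str.isIn_eq] at hnin
      have := (PySem.Chars.isIn_eq_false_iff _ _).mp (by simpa using hnin)
      simpa using this
    rw [pvBuild_none field hc, PySem.Dict.get?_empty]
    apply pvALoop_none
    intro l hl
    obtain ⟨line, hline, rfl⟩ := List.mem_map.mp hl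
    by_contra hsw
    have hsw' : PySem.Str.startswith (String.ofList line) (field ++ ":") = true := by
      revert hsw; cases PySem.Str.startswith (String.ofList line) (field ++ ":") <;> simp
    rw [PySem.Str.startswith_eq] at hsw'
    have hp : (field.toList ++ [':']) <+: line := by
      have := (PySem.Chars.startswith_iff _ _).mp hsw'
      simpa using this
    exact hnin' ((((List.cons_prefix_cons).mpr ⟨rfl, hp⟩).isInfix).trans
      (pvSplit_infix message.toList line hline))
  · rw [pv_loop field hc (List.map String.ofList (pvSplit message.toList)) PySem.Dict.empty]
    simp [PySem.Dict.get?_empty, Option.or]
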